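-- pv_equiv track=rewrite | github.com/reader-wh94/Study_notes | Algorithm/Algorithm_py/programmers2/Carpet.py | solution
-- ===== SOURCE A (Python) =====
-- def solution(brown, yellow):
--   wl_list = []
--   sub = []
--   sum = brown + yellow
--
--   for i in range(1, int(sum ** 0.5) + 1):
--     if sum % i == 0:
--       wid = int(sum / i)
--       leng = i
--       if wid >= leng:
--         wl_list.append([wid, leng])
--
--   for i in range(len(wl_list)):
--     sub.append(wl_list[i][0] - wl_list[i][1])
--
--   return wl_list[sub.index(min(sub))]
-- ===== SOURCE B (Python) =====
-- def solution(brown, yellow):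
--     total = brown + yellow
--     # largest divisor i <= sqrt(total) gives the most-square pair
--     for i in range(int(total ** 0.5), 0, -1):
--         if total % i == 0:
--             return [int(total / i), i]
-- ===== Notes on version B (the rewrite author's own statement) =====
-- stated objective: simpler
-- what changed: Instead of building the full list of divisor pairs, a parallel list of width-length differences, and then indexing by the position of the minimum, B scans downward from int(sqrt(total)) and returns at the first divisor found (differences shrink as the divisor grows, so the first hit is the minimum).
import Mathlib
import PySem

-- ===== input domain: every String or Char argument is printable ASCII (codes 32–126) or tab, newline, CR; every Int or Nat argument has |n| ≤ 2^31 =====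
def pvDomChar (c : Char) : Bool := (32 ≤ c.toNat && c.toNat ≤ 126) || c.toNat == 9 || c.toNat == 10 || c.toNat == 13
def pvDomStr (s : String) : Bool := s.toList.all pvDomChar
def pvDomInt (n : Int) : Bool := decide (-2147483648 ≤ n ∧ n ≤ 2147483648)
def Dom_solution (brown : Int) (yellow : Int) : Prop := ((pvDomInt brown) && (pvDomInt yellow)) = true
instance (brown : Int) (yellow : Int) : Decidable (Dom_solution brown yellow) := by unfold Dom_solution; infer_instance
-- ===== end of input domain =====

-- B replaces A's build-all-pairs + difference-list + index-of-minimum with a single downward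
-- scan from isqrt(total) that returns at the first divisor (objective: simpler).
-- Note on floats: for 0 < total ≤ 2^33 Python's int(total ** 0.5) equals isqrt(total) and
-- int(total / i) for a divisor i equals total // i (both exact in double precision), so both
-- ports use Nat.sqrt / floordiv.

-- ===== PORT A =====
def solution (brown : Int) (yellow : Int) : List Int :=
  let sum := brown + yellow
  -- wl_list: for i in range(1, int(sum**0.5)+1): if sum % i == 0 and wid >= leng: append [wid, leng]
  let wl := (PySem.List.pyRange 1 ((Int.ofNat (Nat.sqrt sum.toNat)) + 1) 1).foldl
      (fun acc i =>
        if PySem.Int.mod sum i == 0 then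
          let wid := PySem.Int.floordiv sum i
          let leng := i
          if leng ≤ wid then acc ++ [[wid, leng]] else acc
        else acc) []
  -- sub: for i in range(len(wl_list)): sub.append(wl_list[i][0] - wl_list[i][1])
  let sub := (PySem.List.pyRange 0 (PySem.List.len wl) 1).foldl
      (fun acc i =>
        acc ++ [PySem.List.pyGetD (PySem.List.pyGetD wl i []) 0 0
                - PySem.List.pyGetD (PySem.List.pyGetD wl i []) 1 0]) []
  -- return wl_list[sub.index(min(sub))]  (min of [] raises ValueError: excluded by Pre_)
  match PySem.List.min? sub (fun x => x) with
  | none => []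
  | some m =>
    match PySem.List.index? sub m with
    | none => []
    | some k => (PySem.List.pyGet? wl (k : Int)).getD []

-- ===== PORT B =====
def solution_alt (brown : Int) (yellow : Int) : List Int :=
  let total := brown + yellow
  -- for i in range(int(total**0.5), 0, -1): if total % i == 0: return [int(total/i), i]
  match (PySem.List.pyRange (Int.ofNat (Nat.sqrt total.toNat)) 0 (-1)).find?
      (fun i => PySem.Int.mod total i == 0) with
  | some i => [PySem.Int.floordiv total i, i]
  | none => []   -- Python falls off the loop (returns None); only reachable for total ≤ 0, outside Pre_

-- ===== PRECONDITION & SPEC =====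
-- Pre_ excludes brown + yellow ≤ 0, where A raises (ValueError from min([]) at total = 0,
-- TypeError from int(complex) for total < 0).
def Pre_solution (brown : Int) (yellow : Int) : Prop := 0 < brown + yellow
instance (brown : Int) (yellow : Int) : Decidable (Pre_solution brown yellow) := by unfold Pre_solution; infer_instance
def pvWitness_solution : Int × Int := (10, 2)

def Spec_solution (brown : Int) (yellow : Int) (out : List Int) : Prop := out = solution_alt brown yellow
instance (brown : Int) (yellow : Int) (out : List Int) : Decidable (Spec_solution brown yellow out) := by unfold Spec_solution; infer_instance

-- ===== CLAIM (what is proved, stated in full; the proofs are below) =====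
def Claim_equal_solution : Prop := ∀ (brown : Int) (yellow : Int), Dom_solution brown yellow → Pre_solution brown yellow → Spec_solution brown yellow (solution brown yellow)

-- ===== LEMMAS AND PROOFS =====

-- i ≤ isqrt n implies i * i ≤ n (over Int)
theorem pv_sq_le (n i : Int) (h0 : 0 < i) (hr : i ≤ Int.ofNat (Nat.sqrt n.toNat)) (hn : 0 < n) :
    i * i ≤ n := by
  rw [Int.ofNat_eq_natCast] at hr
  have h1 : i.toNat ≤ Nat.sqrt n.toNat := by omega
  have h2 : i.toNat * i.toNat ≤ n.toNat := Nat.le_sqrt.mp h1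
  have h3 : ((i.toNat : Int)) = i := Int.toNat_of_nonneg (le_of_lt h0)
  calc i * i = ((i.toNat * i.toNat : Nat) : Int) := by push_cast [h3]; ring
    _ ≤ ((n.toNat : Nat) : Int) := by exact_mod_cast h2
    _ = n := Int.toNat_of_nonneg (le_of_lt hn)

-- n // j ≤ n // i for 0 < i ≤ j, 0 ≤ n
theorem pv_fd_mono (n i j : Int) (hi : 0 < i) (hij : i ≤ j) (hn : 0 ≤ n) :
    PySem.Int.floordiv n j ≤ PySem.Int.floordiv n i := by
  have hj : 0 < j := lt_of_lt_of_le hi hij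
  refine (PySem.Int.le_floordiv_iff_mul_le hi).mpr ?_
  have h0 : 0 ≤ PySem.Int.floordiv n j :=
    (PySem.Int.le_floordiv_iff_mul_le hj).mpr (by simpa using hn)
  have hdm := PySem.Int.floordiv_mul_add_mod n j
  have hm := PySem.Int.mod_nonneg n hj
  nlinarith

-- the core equality, for positive total
theorem pv_main (brown yellow : Int) (hpre : 0 < brown + yellow) :
    solution brown yellow = solution_alt brown yellow := by
  unfold solution solution_alt
  dsimp only
  set N := brown + yellow with hN
  set r : Int := Int.ofNat (Nat.sqrt N.toNat) with hrdef
  have hr1 : 1 ≤ r := by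
    have h1 : 1 ≤ Nat.sqrt N.toNat := Nat.le_sqrt.mpr (by omega)
    rw [hrdef, Int.ofNat_eq_natCast]
    exact_mod_cast h1
  set divs := (PySem.List.pyRange 1 (r + 1) 1).filter (fun i => PySem.Int.mod N i == 0)
    with hdivs
  have hmem : ∀ i ∈ divs, 1 ≤ i ∧ i ≤ r ∧ i ∣ N := by
    intro i hi
    rw [hdivs, List.mem_filter] at hi
    obtain ⟨hi1, hi2⟩ := hi
    have hb := PySem.List.mem_pyRange_one.mp hi1
    exact ⟨hb.1, by omega, (PySem.Int.mod_eq_zero_iff_dvd N i).mp (by simpa using hi2)⟩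
  -- Step 1: wl_list is divs.map (fun i => [N // i, i]) (the inner `wid >= leng` test always passes)
  have hwl : ((PySem.List.pyRange 1 (r + 1) 1).foldl
      (fun acc i =>
        if PySem.Int.mod N i == 0 then
          let wid := PySem.Int.floordiv N i
          let leng := i
          if leng ≤ wid then acc ++ [[wid, leng]] else acc
        else acc) []) = divs.map (fun i => [PySem.Int.floordiv N i, i]) := by
    rw [PySem.List.foldl_congr_mem _ _
        (fun acc i => if PySem.Int.mod N i == 0 then acc ++ [[PySem.Int.floordiv N i, i]] else acc)
        _ ?_]
    · rw [PySem.List.foldl_append_if, hdivs]; simp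
    · intro acc i hi
      have hb := PySem.List.mem_pyRange_one.mp hi
      by_cases hmod : PySem.Int.mod N i == 0
      · have hle : i ≤ PySem.Int.floordiv N i :=
          (PySem.Int.le_floordiv_iff_mul_le (by omega)).mpr
            (pv_sq_le N i (by omega) (by omega) hpre)
        simp [hmod, hle]
      · simp [hmod]
  rw [hwl]
  set wl := divs.map (fun i => [PySem.Int.floordiv N i, i]) with hwldef
  -- Step 2: sub is the list of differences N // i - i
  have hsub : ((PySem.List.pyRange 0 (PySem.List.len wl) 1).foldl
      (fun acc i =>
        acc ++ [PySem.List.pyGetD (PySem.List.pyGetD wl i []) 0 0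
                - PySem.List.pyGetD (PySem.List.pyGetD wl i []) 1 0]) []) =
      divs.map (fun i => PySem.Int.floordiv N i - i) := by
    rw [PySem.List.foldl_pyRange_zero_pyGetD wl []
        (fun acc p => acc ++ [PySem.List.pyGetD p 0 0 - PySem.List.pyGetD p 1 0]) []]
    rw [PySem.List.foldl_append_singleton_eq_map, hwldef, List.map_map]
    rfl
  rw [hsub]
  set sub := divs.map (fun i => PySem.Int.floordiv N i - i) with hsubdef
  -- sub is strictly decreasing
  have hpw : sub.Pairwise (fun a b => b < a) := by
    rw [hsubdef, List.pairwise_map]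
    refine List.Pairwise.imp_of_mem ?_
      ((PySem.List.pairwise_lt_pyRange_one 1 (r + 1)).filter _)
    intro a b ha hb hab
    have hma := hmem a ha
    have hmb := hmem b hb
    have := pv_fd_mono N a b (by omega) (le_of_lt hab) (le_of_lt hpre)
    omega
  have hdne : divs ≠ [] := by
    have h1 : (1 : Int) ∈ divs := by
      rw [hdivs, List.mem_filter]
      refine ⟨PySem.List.mem_pyRange_one.mpr ⟨le_refl _, by omega⟩, ?_⟩
      simp
    exact List.ne_nil_of_mem h1
  have hsubne : sub ≠ [] := by
    rw [hsubdef]; simpa using hdne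
  -- the last element is the (strict) minimum of sub
  have hsplit := List.dropLast_append_getLast hsubne
  have hlt : ∀ a ∈ sub.dropLast, sub.getLast hsubne < a := by
    have hpw' := hpw
    rw [← hsplit, List.pairwise_append] at hpw'
    intro a ha
    exact hpw'.2.2 a ha _ (by simp)
  have hlast_le : ∀ y ∈ sub, sub.getLast hsubne ≤ y := by
    intro y hy
    rw [← hsplit, List.mem_append] at hy
    rcases hy with hy | hy
    · exact le_of_lt (hlt y hy)
    · simp at hy; omega
  obtain ⟨m, hm⟩ : ∃ m, PySem.List.min? sub (fun x => x) = some m := by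
    cases h : PySem.List.min? sub (fun x => x) with
    | none => exact absurd ((PySem.List.min?_eq_none_iff sub _).mp h) hsubne
    | some m => exact ⟨m, rfl⟩
  have hmlast : m = sub.getLast hsubne :=
    le_antisymm (PySem.List.min?_isMin hm _ (List.getLast_mem hsubne))
      (hlast_le m (PySem.List.min?_mem hm))
  have hnotin : sub.getLast hsubne ∉ sub.dropLast := fun hc =>
    lt_irrefl _ (hlt _ hc)
  have hidx : PySem.List.index? sub (sub.getLast hsubne) = some sub.dropLast.length := by
    have h := PySem.List.index?_append_singleton_self sub.dropLast _ hnotin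
    rw [hsplit] at h
    exact h
  rw [hm, hmlast]
  dsimp only
  rw [hidx]
  dsimp only
  -- A returns wl[len - 1] = wl.getLast
  have hlen : sub.dropLast.length = wl.length - 1 := by
    rw [List.length_dropLast, hsubdef, hwldef]; simp
  have hA : (PySem.List.pyGet? wl (sub.dropLast.length : Int)).getD [] =
      ((divs.getLast?).map (fun i => [PySem.Int.floordiv N i, i])).getD [] := by
    rw [PySem.List.pyGet?_natCast, hlen, ← List.getLast?_eq_getElem?, hwldef,
      List.getLast?_map]
  rw [hA]
  -- B scans the same range downwards: its find? is divs.getLast?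
  have hrange : PySem.List.pyRange r 0 (-1) = (PySem.List.pyRange 1 (r + 1) 1).reverse := by
    rw [PySem.List.pyRange_neg_one_eq_reverse]; norm_num
  have hB : (PySem.List.pyRange r 0 (-1)).find? (fun i => PySem.Int.mod N i == 0) =
      divs.getLast? := by
    rw [hrange, hdivs, List.getLast?_filter]
  rw [hB]
  obtain ⟨i0, hi0⟩ : ∃ i0, divs.getLast? = some i0 := by
    cases h : divs.getLast? with
    | none => exact absurd (List.getLast?_eq_none_iff.mp h) hdne
    | some i0 => exact ⟨i0, rfl⟩
  rw [hi0]
  rfl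

-- ===== VERDICT (by name: the statement is the Claim_ definition above) =====
theorem solution_spec : Claim_equal_solution := by
  intro brown yellow _ hpre
  exact pv_main brown yellow hpre
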